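-- pv_equiv track=rewrite | github.com/tagword/codeagent | src/agent_runtime_pkg/_agent_runtime_pkg_merged.py | _consecutive_error_tail_count
-- ===== SOURCE A (Python) =====
-- from typing import Any, Dict, List, Optional, Tuple
-- from typing import Any, Dict, List, Optional, Sequence, Tuple
-- from typing import Any, Dict, List, Optional
-- from typing import Any, Dict, List
-- from typing import Any, Callable, Dict, List, Optional, Tuple
-- from typing import Any, Dict, List, Optional, Sequence, Tuple
--
-- def _consecutive_error_tail_count(outcomes: List[Tuple[str, bool, str]]) -> int:
--     n = 0
--     for _name, is_err, _msg in reversed(outcomes):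
--         if is_err:
--             n += 1
--         else:
--             break
--     return n
-- ===== SOURCE B (Python) =====
-- def _consecutive_error_tail_count(outcomes):
--     n = 0
--     for _name, is_err, _msg in outcomes:
--         if is_err:
--             n += 1
--         else:
--             n = 0
--     return n
-- ===== Notes on version B (the rewrite author's own statement) =====
-- stated objective: alternative
-- what changed: Replaced the reversed-iteration-with-break scan by a single forward pass keeping a run counter that resets to 0 at every non-error outcome.
import Mathlib
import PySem

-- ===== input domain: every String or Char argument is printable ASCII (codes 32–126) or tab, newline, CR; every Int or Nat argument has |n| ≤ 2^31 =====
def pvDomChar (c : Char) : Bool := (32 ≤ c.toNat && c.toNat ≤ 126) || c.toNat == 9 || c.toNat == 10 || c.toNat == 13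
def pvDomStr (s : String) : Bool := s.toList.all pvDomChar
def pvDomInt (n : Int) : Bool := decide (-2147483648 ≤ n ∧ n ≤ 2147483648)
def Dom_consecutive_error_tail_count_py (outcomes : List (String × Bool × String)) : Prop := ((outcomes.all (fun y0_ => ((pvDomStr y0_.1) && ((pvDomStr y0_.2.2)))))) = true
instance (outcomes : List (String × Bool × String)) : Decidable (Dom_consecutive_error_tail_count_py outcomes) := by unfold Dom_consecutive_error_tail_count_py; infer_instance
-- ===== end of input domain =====

-- ===== PORT A =====
def pvTailCountRev (l : List (String × Bool × String)) : Int :=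
  match l with
  | [] => 0
  | (_, is_err, _) :: t => if is_err then 1 + pvTailCountRev t else 0

-- literal port of A: iterate over reversed(outcomes), count while is_err, break otherwise
def consecutive_error_tail_count_py (outcomes : List (String × Bool × String)) : Int :=
  pvTailCountRev outcomes.reverse

-- ===== PORT B =====
-- port of B: forward fold, counter incremented on error, reset to 0 on success
def consecutive_error_tail_count_py_alt (outcomes : List (String × Bool × String)) : Int :=
  outcomes.foldl (fun n y => if y.2.1 then n + 1 else 0) 0

-- ===== PRECONDITION & SPEC =====
def Spec_consecutive_error_tail_count_py (outcomes : List (String × Bool × String)) (out : Int) : Prop := out = consecutive_error_tail_count_py_alt outcomes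
instance (outcomes : List (String × Bool × String)) (out : Int) : Decidable (Spec_consecutive_error_tail_count_py outcomes out) := by unfold Spec_consecutive_error_tail_count_py; infer_instance

-- ===== CLAIM (what is proved, stated in full; the proofs are below) =====
def Claim_equal_consecutive_error_tail_count_py : Prop := ∀ (outcomes : List (String × Bool × String)), Dom_consecutive_error_tail_count_py outcomes → Spec_consecutive_error_tail_count_py outcomes (consecutive_error_tail_count_py outcomes)

-- ===== LEMMAS AND PROOFS =====
theorem pvTailCountRev_nonneg (l : List (String × Bool × String)) : 0 ≤ pvTailCountRev l := by
  induction l with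
  | nil => simp [pvTailCountRev]
  | cons x t ih =>
    simp only [pvTailCountRev]
    split <;> omega

theorem pvTailCountRev_eq_length (l : List (String × Bool × String))
    (h : pvTailCountRev l = (l.length : Int)) : l.all (fun y => y.2.1) = true := by
  induction l with
  | nil => simp
  | cons z s ihs =>
    simp only [pvTailCountRev, List.length_cons] at h
    by_cases hz : z.2.1
    · simp only [hz, if_true] at h
      have hs : pvTailCountRev s = (s.length : Int) := by push_cast at h; omega
      simp [List.all_cons, hz, ihs hs]
    · simp only [hz] at h
      have h1 := pvTailCountRev_nonneg s
      have h2 : (0:Int) ≤ (s.length : Int) := by positivity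
      simp at h
      omega

theorem pvTailCountRev_of_all (l : List (String × Bool × String))
    (h : l.all (fun y => y.2.1) = true) : pvTailCountRev l = (l.length : Int) := by
  induction l with
  | nil => simp [pvTailCountRev]
  | cons x t ih =>
    simp only [List.all_cons, Bool.and_eq_true] at h
    simp [pvTailCountRev, h.1, ih h.2]
    ring

theorem pv_foldl_char (l : List (String × Bool × String)) (acc : Int) :
    l.reverse.foldl (fun n y => if y.2.1 then n + 1 else 0) acc
      = if l.all (fun y => y.2.1) then acc + l.length else pvTailCountRev l := by
  induction l generalizing acc with
  | nil => simp
  | cons x t ih =>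
    simp only [List.reverse_cons, List.foldl_append, List.foldl_cons, List.foldl_nil, ih,
      pvTailCountRev, List.all_cons, List.length_cons]
    by_cases hx : x.2.1
    · by_cases ht : t.all (fun y => y.2.1) = true
      · simp [hx, ht]; omega
      · have hne : pvTailCountRev t ≠ (t.length : Int) := fun h => ht (pvTailCountRev_eq_length t h)
        simp [hx, ht]
        omega
    · simp [hx]

-- ===== VERDICT (by name: the statement is the Claim_ definition above) =====
theorem consecutive_error_tail_count_py_spec : Claim_equal_consecutive_error_tail_count_py := by
  intro outcomes _
  unfold Spec_consecutive_error_tail_count_py consecutive_error_tail_count_py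
    consecutive_error_tail_count_py_alt
  rw [show outcomes = outcomes.reverse.reverse by simp] at *
  generalize outcomes.reverse = l
  simp only [List.reverse_reverse]
  rw [pv_foldl_char]
  split
  · next h =>
    have := pvTailCountRev_of_all l h
    omega
  · rfl
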